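-- pv_equiv track=rewrite | github.com/lghxiayan/lghxiayan | PYQT6/mytools/wow/test13.py | base8encode
-- ===== SOURCE A (Python) =====
-- def base8encode(s):
--     b8 = '01234567'
--     result = ''
--     temp = 0
--     for c in s:
--         temp = temp * 256 + ord(c)
--     while temp > 0:
--         result = b8[temp % 8] + result
--         temp = temp // 8
--     return result
-- ===== SOURCE B (Python) =====
-- def base8encode(s):
--     # O(n): read the concatenated 8-bit codes in 3-bit groups, strip leading zeros
--     bits = ''.join(format(ord(c), '08b') for c in s)
--     bits = '0' * (-len(bits) % 3) + bits
--     digits = ''.join(str(int(bits[i:i + 3], 2)) for i in range(0, len(bits), 3))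
--     return digits.lstrip('0')
-- ===== Notes on version B (the rewrite author's own statement) =====
-- stated objective: faster
-- what changed: Instead of building one huge big-integer and extracting octal digits by repeated division (quadratic in the string length), B concatenates the 8-bit binary codes of the characters, reads them left-to-right in 3-bit groups after left-padding to a multiple of 3, and strips leading zero digits.
import Mathlib
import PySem

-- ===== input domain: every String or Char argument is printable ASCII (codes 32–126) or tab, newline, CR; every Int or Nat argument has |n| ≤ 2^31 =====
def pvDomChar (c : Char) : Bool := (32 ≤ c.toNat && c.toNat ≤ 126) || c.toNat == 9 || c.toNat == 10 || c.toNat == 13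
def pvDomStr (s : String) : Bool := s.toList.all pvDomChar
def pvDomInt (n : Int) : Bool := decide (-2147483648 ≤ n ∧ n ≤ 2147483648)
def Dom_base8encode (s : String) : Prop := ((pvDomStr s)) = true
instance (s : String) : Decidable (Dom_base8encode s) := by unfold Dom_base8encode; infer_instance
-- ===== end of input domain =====

-- B replaces A's big-integer accumulation + repeated division (O(n^2)) by a single
-- left-to-right read of the concatenated 8-bit character codes in 3-bit groups (O(n)).

-- ===== PORT A =====
-- b8 = '01234567'
def pvB8 : List Char := ['0', '1', '2', '3', '4', '5', '6', '7']

-- for c in s: temp = temp * 256 + ord(c)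
def pvTempA : List Char → Int → Int
  | [], temp => temp
  | c :: cs, temp => pvTempA cs (temp * 256 + (c.toNat : Int))

-- while temp > 0: result = b8[temp % 8] + result; temp = temp // 8
def pvLoopA (temp : Int) (result : List Char) : List Char :=
  if h : temp > 0 then
    pvLoopA (PySem.Int.floordiv temp 8) (pvB8.getD (PySem.Int.mod temp 8).toNat ' ' :: result)
  else result
termination_by temp.toNat
decreasing_by
  have h8 : PySem.Int.floordiv temp 8 = temp / 8 := PySem.Int.floordiv_eq_ediv_of_pos (by omega)
  omega

def base8encode (s : String) : String :=
  String.mk (pvLoopA (pvTempA s.toList 0) [])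

-- ===== PORT B =====
-- minimal binary representation of n (empty for 0); bin(n) without the prefix
def pvBinRep : Nat → List Char
  | 0 => []
  | n + 1 => pvBinRep ((n + 1) / 2) ++ [if (n + 1) % 2 = 1 then '1' else '0']
decreasing_by omega

-- format(ord(c), '08b'): binary representation left-padded with '0' to width 8
def pvBin8 (n : Nat) : List Char :=
  List.replicate (8 - (pvBinRep n).length) '0' ++ pvBinRep n

-- value of a bit character
def pvBv (c : Char) : Nat := if c = '1' then 1 else 0

-- for i in range(0, len(bits), 3): str(int(bits[i:i+3], 2)) — groups of exactly 3 bits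
def pvChunks3 : List Char → List Char
  | b2 :: b1 :: b0 :: rest =>
      (PySem.Int.toStr ((4 * pvBv b2 + 2 * pvBv b1 + pvBv b0 : Nat) : Int)).toList ++ pvChunks3 rest
  | _ => []

def base8encode_alt (s : String) : String :=
  let bits := s.toList.flatMap (fun c => pvBin8 c.toNat)
  -- '0' * (-len(bits) % 3) + bits
  let padded := List.replicate ((3 - bits.length % 3) % 3) '0' ++ bits
  String.mk ((pvChunks3 padded).dropWhile (· = '0'))

-- ===== PRECONDITION & SPEC =====
def Spec_base8encode (s : String) (out : String) : Prop := out = base8encode_alt s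
instance (s : String) (out : String) : Decidable (Spec_base8encode s out) := by unfold Spec_base8encode; infer_instance

-- ===== CLAIM (what is proved, stated in full; the proofs are below) =====
def Claim_equal_base8encode : Prop := ∀ (s : String), Dom_base8encode s → Spec_base8encode s (base8encode s)

-- ===== LEMMAS AND PROOFS =====

-- reference: big-endian octal digits of n, empty for 0
def pvOct (n : Nat) : List Char :=
  if n = 0 then [] else pvOct (n / 8) ++ [pvB8.getD (n % 8) ' ']
decreasing_by exact Nat.div_lt_self (by omega) (by omega)

-- big-endian value of a bit string, with initial accumulator a
def pvVal (a : Nat) (bs : List Char) : Nat := bs.foldl (fun x b => 2 * x + pvBv b) a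

theorem pvBv_le (c : Char) : pvBv c ≤ 1 := by unfold pvBv; split <;> omega

theorem pvVal_append (a : Nat) (xs ys : List Char) :
    pvVal a (xs ++ ys) = pvVal (pvVal a xs) ys := by
  unfold pvVal; exact List.foldl_append

theorem pvVal_init (bs : List Char) : ∀ a : Nat,
    pvVal a bs = a * 2 ^ bs.length + pvVal 0 bs := by
  induction bs with
  | nil => intro a; simp [pvVal]
  | cons b bs ih =>
      intro a
      show pvVal (2 * a + pvBv b) bs = a * 2 ^ (b :: bs).length + pvVal (2 * 0 + pvBv b) bs
      rw [ih (2 * a + pvBv b), ih (2 * 0 + pvBv b)]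
      simp [List.length_cons, pow_succ]; ring

theorem pvVal_lt (bs : List Char) : pvVal 0 bs < 2 ^ bs.length := by
  induction bs with
  | nil => simp [pvVal]
  | cons b bs ih =>
      show pvVal (2 * 0 + pvBv b) bs < 2 ^ (b :: bs).length
      rw [pvVal_init]
      have := pvBv_le b
      simp only [List.length_cons, pow_succ]
      nlinarith [pow_pos (show 0 < 2 by omega) bs.length]

theorem pvVal_replicate (p : Nat) : ∀ a : Nat, pvVal a (List.replicate p '0') = a * 2 ^ p := by
  induction p with
  | zero => intro a; simp [pvVal]
  | succ p ih =>
      intro a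
      rw [List.replicate_succ]
      show pvVal (2 * a + pvBv '0') (List.replicate p '0') = a * 2 ^ (p + 1)
      rw [ih]
      simp [pvBv, pow_succ]; ring

theorem pvBinRep_val (n : Nat) : pvVal 0 (pvBinRep n) = n := by
  induction n using Nat.strong_induction_on with
  | _ n ih =>
      match n with
      | 0 => simp [pvBinRep, pvVal]
      | m + 1 =>
          rw [pvBinRep, pvVal_append, ih ((m + 1) / 2) (by omega)]
          show 2 * ((m + 1) / 2) + pvBv _ = m + 1
          by_cases h : (m + 1) % 2 = 1 <;> simp [h, pvBv] <;> omega

theorem pvBinRep_len (n : Nat) : ∀ k, n < 2 ^ k → (pvBinRep n).length ≤ k := by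
  induction n using Nat.strong_induction_on with
  | _ n ih =>
      match n with
      | 0 => intro k _; simp [pvBinRep]
      | m + 1 =>
          intro k hk
          have hk0 : k ≠ 0 := by rintro rfl; simp at hk
          obtain ⟨k', rfl⟩ : ∃ k', k = k' + 1 := ⟨k - 1, by omega⟩
          have h2 : (2:Nat) ^ (k' + 1) = 2 * 2 ^ k' := by ring
          have : (m + 1) / 2 < 2 ^ k' := by omega
          have hle := ih ((m + 1) / 2) (by omega) k' this
          rw [pvBinRep]
          simp only [List.length_append, List.length_cons, List.length_nil]
          omega

theorem pvBin8_val (n : Nat) (hn : n < 256) (a : Nat) : pvVal a (pvBin8 n) = a * 256 + n := by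
  have hL : (pvBinRep n).length ≤ 8 := pvBinRep_len n 8 (by norm_num; omega)
  rw [pvBin8, pvVal_append, pvVal_replicate, pvVal_init, pvBinRep_val]
  have : 8 - (pvBinRep n).length + (pvBinRep n).length = 8 := by omega
  rw [mul_assoc, ← pow_add, this]
  norm_num

theorem pvVal_flatMap (cs : List Char) : ∀ a : Nat, (∀ c ∈ cs, c.toNat < 256) →
    pvVal a (cs.flatMap (fun c => pvBin8 c.toNat)) =
      cs.foldl (fun x c => x * 256 + c.toNat) a := by
  induction cs with
  | nil => intro a _; simp [pvVal]
  | cons c cs ih =>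
      intro a h
      rw [List.flatMap_cons, pvVal_append, pvBin8_val c.toNat (h c (by simp)) a]
      rw [ih _ (fun d hd => h d (by simp [hd]))]
      rfl

theorem pvTempA_nat (cs : List Char) : ∀ a : Nat,
    pvTempA cs (a : Int) = ((cs.foldl (fun x c => x * 256 + c.toNat) a : Nat) : Int) := by
  induction cs with
  | nil => intro a; simp [pvTempA]
  | cons c cs ih =>
      intro a
      show pvTempA cs ((a : Int) * 256 + (c.toNat : Int)) = _
      have : (a : Int) * 256 + (c.toNat : Int) = ((a * 256 + c.toNat : Nat) : Int) := by push_cast; ring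
      rw [this, ih]
      rfl

theorem pvLoopA_oct (n : Nat) : ∀ acc, pvLoopA (n : Int) acc = pvOct n ++ acc := by
  induction n using Nat.strong_induction_on with
  | _ n ih =>
      intro acc
      rw [pvLoopA, pvOct]
      by_cases h : n = 0
      · subst h; simp
      · have hpos : (n : Int) > 0 := by omega
        rw [dif_pos hpos, if_neg h]
        have hfd : PySem.Int.floordiv (n : Int) 8 = ((n / 8 : Nat) : Int) := by
          rw [PySem.Int.floordiv_eq_ediv_of_pos (by omega)]
          omega
        have hmd : PySem.Int.mod (n : Int) 8 = ((n % 8 : Nat) : Int) := by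
          rw [PySem.Int.mod_eq_emod_of_pos (by omega)]
          omega
        rw [hfd, hmd, Int.toNat_natCast, ih (n / 8) (Nat.div_lt_self (by omega) (by omega))]
        simp

theorem pvOct_digit (d : Nat) (hd : d < 8) :
    (PySem.Int.toStr ((d : Nat) : Int)).toList = [pvB8.getD d ' '] := by
  interval_cases d <;> decide

theorem pvOct_peel (k : Nat) : ∀ d M, 0 < d → d < 8 → M < 8 ^ k →
    pvOct (d * 8 ^ k + M) =
      pvB8.getD d ' ' :: (List.replicate (k - (pvOct M).length) '0' ++ pvOct M) := by
  induction k with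
  | zero =>
      intro d M hd0 hd8 hM
      have : M = 0 := by omega
      subst this
      rw [pvOct]
      simp only [pow_zero, mul_one, Nat.add_zero]
      rw [if_neg (by omega)]
      have h1 : d / 8 = 0 := by omega
      have h2 : d % 8 = d := by omega
      rw [h1, h2, pvOct]
      simp [pvOct]
  | succ k ih =>
      intro d M hd0 hd8 hM
      have h8 : (8:Nat) ^ (k + 1) = 8 * 8 ^ k := by ring
      have hpos : d * 8 ^ (k + 1) + M ≠ 0 := by
        have : 0 < 8 ^ (k+1) := pow_pos (by omega) _
        nlinarith
      rw [pvOct, if_neg hpos]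
      have hdiv : (d * 8 ^ (k + 1) + M) / 8 = d * 8 ^ k + M / 8 := by
        rw [h8]
        rw [show d * (8 * 8 ^ k) + M = (d * 8 ^ k) * 8 + M by ring]
        omega
      have hmod : (d * 8 ^ (k + 1) + M) % 8 = M % 8 := by
        rw [h8]
        rw [show d * (8 * 8 ^ k) + M = (d * 8 ^ k) * 8 + M by ring]
        omega
      have hM8 : M / 8 < 8 ^ k := by omega
      rw [hdiv, hmod, ih d (M / 8) hd0 hd8 hM8]
      by_cases hM0 : M = 0
      · subst hM0
        simp only [Nat.zero_div, Nat.zero_mod]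
        rw [show pvOct 0 = [] from by rw [pvOct]; simp,
            show pvB8.getD (0 : Nat) ' ' = '0' from by decide]
        simp [List.replicate_succ' (n := k)]
      · have hMoct : pvOct M = pvOct (M / 8) ++ [pvB8.getD (M % 8) ' '] := by
          rw [pvOct, if_neg hM0]
        rw [hMoct]
        simp only [List.length_append, List.length_cons, List.length_nil, List.cons_append,
          List.append_assoc]
        congr 2
        congr 1
        omega

theorem pvChunks3_oct (k : Nat) : ∀ bs : List Char, bs.length = 3 * k →
    pvChunks3 bs = List.replicate (k - (pvOct (pvVal 0 bs)).length) '0' ++ pvOct (pvVal 0 bs)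
      ∧ (pvOct (pvVal 0 bs)).length ≤ k := by
  induction k with
  | zero =>
      intro bs h
      have : bs = [] := List.eq_nil_of_length_eq_zero (by omega)
      subst this
      constructor
      · rw [show pvVal 0 [] = 0 from rfl, show pvOct 0 = [] from by rw [pvOct]; simp,
            show pvChunks3 [] = [] from rfl]
        simp
      · rw [show pvVal 0 [] = 0 from rfl, show pvOct 0 = [] from by rw [pvOct]; simp]
        simp
  | succ k ih =>
      intro bs h
      match bs with
      | b2 :: b1 :: b0 :: rest =>
          have hrest : rest.length = 3 * k := by simp at h; omega
          set d : Nat := 4 * pvBv b2 + 2 * pvBv b1 + pvBv b0 with hd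
          have hd8 : d < 8 := by
            have := pvBv_le b2; have := pvBv_le b1; have := pvBv_le b0; omega
          have hval : pvVal 0 (b2 :: b1 :: b0 :: rest) = pvVal d rest := by
            show pvVal (2 * (2 * (2 * 0 + pvBv b2) + pvBv b1) + pvBv b0) rest = pvVal d rest
            congr 1; omega
          set M : Nat := pvVal 0 rest with hMdef
          have hM : M < 8 ^ k := by
            have := pvVal_lt rest
            rw [hrest] at this
            calc M < 2 ^ (3 * k) := this
              _ = 8 ^ k := by rw [show (8:Nat) = 2 ^ 3 from rfl, ← pow_mul]
          have hvalN : pvVal 0 (b2 :: b1 :: b0 :: rest) = d * 8 ^ k + M := by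
            rw [hval, pvVal_init, hrest, hMdef]
            congr 1
            rw [show (8:Nat) = 2 ^ 3 from rfl, ← pow_mul]
          obtain ⟨ihr, ihl⟩ := ih rest hrest
          rw [← hMdef] at ihr ihl
          have hchunk : pvChunks3 (b2 :: b1 :: b0 :: rest) =
              (PySem.Int.toStr ((d : Nat) : Int)).toList ++ pvChunks3 rest := rfl
          rw [hchunk, pvOct_digit d hd8, ihr, hvalN]
          by_cases hd0 : d = 0
          · rw [hd0]
            simp only [Nat.zero_mul, Nat.zero_add]
            constructor
            · rw [show pvB8.getD (0 : Nat) ' ' = '0' from by decide]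
              have h1 : k + 1 - (pvOct M).length = (k - (pvOct M).length) + 1 := by omega
              rw [h1, List.replicate_succ]
              simp
            · omega
          · rw [pvOct_peel k d M (by omega) hd8 hM]
            constructor
            · have : k + 1 - (k + 1) = 0 := by omega
              have hlen : (pvB8.getD d ' ' ::
                  (List.replicate (k - (pvOct M).length) '0' ++ pvOct M)).length = k + 1 := by
                simp; omega
              rw [hlen, this]
              simp
            · simp; omega

theorem dropWhile_replicate (z : Nat) (rest : List Char) :
    List.dropWhile (· = '0') (List.replicate z '0' ++ rest) = List.dropWhile (· = '0') rest := by
  induction z with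
  | zero => simp
  | succ z ih => rw [List.replicate_succ]; simpa using ih

theorem pvOct_ne_nil (n : Nat) (h : n ≠ 0) : pvOct n ≠ [] := by
  rw [pvOct, if_neg h]; simp

theorem pvOct_dropWhile (n : Nat) : List.dropWhile (· = '0') (pvOct n) = pvOct n := by
  induction n using Nat.strong_induction_on with
  | _ n ih =>
      by_cases h : n = 0
      · subst h; rw [pvOct]; simp
      · rw [pvOct, if_neg h]
        by_cases h8 : n < 8
        · have h1 : n / 8 = 0 := by omega
          have h2 : n % 8 = n := by omega
          have h0 : 1 ≤ n := by omega
          have hne : pvB8.getD n ' ' ≠ '0' := by interval_cases n <;> decide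
          rw [h1, h2, show pvOct 0 = [] from by rw [pvOct]; simp, List.nil_append,
            List.dropWhile_cons, if_neg (by simpa [List.getD] using hne)]
        · have hq : n / 8 ≠ 0 := by omega
          have ihq := ih (n / 8) (Nat.div_lt_self (by omega) (by omega))
          obtain ⟨hh, tt, heq⟩ : ∃ hh tt, pvOct (n / 8) = hh :: tt := by
            cases hx : pvOct (n / 8) with
            | nil => exact absurd hx (pvOct_ne_nil _ hq)
            | cons a b => exact ⟨a, b, rfl⟩
          rw [heq] at ihq ⊢
          have hph : ¬ (hh = '0') := by
            intro hc
            rw [List.dropWhile_cons, if_pos (by simp [hc])] at ihq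
            have hlen := List.length_dropWhile_le (fun x => decide (x = '0')) tt
            rw [ihq] at hlen
            simp only [List.length_cons] at hlen
            omega
          rw [List.cons_append, List.dropWhile_cons, if_neg (by simp [hph])]

-- ===== VERDICT (by name: the statement is the Claim_ definition above) =====
theorem base8encode_spec : Claim_equal_base8encode := by
  unfold Claim_equal_base8encode
  intro s hdom
  unfold Spec_base8encode
  have hcodes : ∀ c ∈ s.toList, c.toNat < 256 := by
    intro c hc
    have := List.all_eq_true.mp hdom c hc
    unfold pvDomChar at this
    simp only [Bool.or_eq_true, Bool.and_eq_true, decide_eq_true_eq, beq_iff_eq] at this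
    omega
  show String.mk (pvLoopA (pvTempA s.toList 0) []) =
    String.mk ((pvChunks3 (List.replicate
        ((3 - (s.toList.flatMap (fun c => pvBin8 c.toNat)).length % 3) % 3) '0' ++
      s.toList.flatMap (fun c => pvBin8 c.toNat))).dropWhile (· = '0'))
  set bits := s.toList.flatMap (fun c => pvBin8 c.toNat) with hbits
  set p := (3 - bits.length % 3) % 3 with hp
  set padded := List.replicate p '0' ++ bits with hpadded
  -- the padded bit string has length a multiple of 3
  have hlen3 : padded.length = 3 * ((p + bits.length) / 3) := by
    have : padded.length = p + bits.length := by rw [hpadded]; simp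
    rw [this]; omega
  -- its value is A's accumulated temp
  have hvalpad : pvVal 0 padded = s.toList.foldl (fun x c => x * 256 + c.toNat) 0 := by
    rw [hpadded, pvVal_append, pvVal_replicate, Nat.zero_mul, hbits]
    exact pvVal_flatMap s.toList 0 hcodes
  set N := s.toList.foldl (fun x c => x * 256 + c.toNat) 0 with hN
  -- A's side
  have hA : pvLoopA (pvTempA s.toList 0) [] = pvOct N := by
    rw [show (0 : Int) = ((0 : Nat) : Int) from rfl, pvTempA_nat, pvLoopA_oct, hN]
    simp
  -- B's side
  obtain ⟨hchunk, _⟩ := pvChunks3_oct ((p + bits.length) / 3) padded hlen3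
  rw [hA, hchunk, hvalpad, dropWhile_replicate, pvOct_dropWhile]
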